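-- pv_equiv track=rewrite | github.com/Range18/maze_sort_tochka | run.py | get_initial_state
-- ===== SOURCE A (Python) =====
-- from typing import Tuple, List, Union
--
-- TYPES = {"A": 0, "B": 1, "C": 2, "D": 3}
--
-- Location = Tuple[int, int, int]
--
-- def get_initial_state(raw_rooms: list[str], depth: int) -> tuple[Location]:
--     rows = [raw_room[3:10:2] for raw_room in raw_rooms]
--     locations = []
--     for i in range(depth):
--         for j in range(len(rows[i])):
--             locations.append(((j + 1) * 2, i + 1, -1, TYPES[rows[i][j]]))
--     locations.sort(key=lambda x: x[3])
--     return tuple(locations)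
-- ===== SOURCE B (Python) =====
-- TYPES = {"A": 0, "B": 1, "C": 2, "D": 3}
--
--
-- def get_initial_state(raw_rooms, depth):
--     # Bucket the parsed locations by type instead of sorting them afterwards:
--     # filling buckets in i-then-j order and concatenating them in type order
--     # 0,1,2,3 reproduces the stable sort by x[3] exactly.
--     buckets = ([], [], [], [])
--     for i in range(depth):
--         row = raw_rooms[i][3:10:2]
--         for j, ch in enumerate(row):
--             t = TYPES[ch]
--             buckets[t].append(((j + 1) * 2, i + 1, -1, t))
--     return tuple(buckets[0] + buckets[1] + buckets[2] + buckets[3])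
-- ===== Notes on version B (the rewrite author's own statement) =====
-- stated objective: alternative
-- what changed: B drops A's final comparison sort: during the same i/j parse it distributes each location tuple into one of four per-type buckets and concatenates the buckets in type order, which reproduces the stable sort by the fourth component exactly.
import Mathlib
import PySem

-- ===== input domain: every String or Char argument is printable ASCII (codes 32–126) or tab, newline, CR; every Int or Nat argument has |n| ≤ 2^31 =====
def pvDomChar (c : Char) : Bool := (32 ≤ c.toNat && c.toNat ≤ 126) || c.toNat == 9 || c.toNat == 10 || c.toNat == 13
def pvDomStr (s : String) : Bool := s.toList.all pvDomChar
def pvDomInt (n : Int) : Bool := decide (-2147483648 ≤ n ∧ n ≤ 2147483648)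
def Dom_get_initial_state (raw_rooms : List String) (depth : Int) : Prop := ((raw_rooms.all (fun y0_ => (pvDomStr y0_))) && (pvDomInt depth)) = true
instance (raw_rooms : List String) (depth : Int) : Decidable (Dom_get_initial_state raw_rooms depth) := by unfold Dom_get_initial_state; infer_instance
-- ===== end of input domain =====

-- B replaces A's final comparison sort by distributing each parsed location into one of
-- four buckets (one per room type) during the parse and concatenating the buckets in
-- type order, which reproduces the stable sort by the fourth component exactly.

-- ===== PORT A =====

-- TYPES[c]; the final 0 default is never reached under Pre_ (Python raises KeyError there)
def pvTypeOf (c : Char) : Int :=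
  if c = 'A' then 0 else if c = 'B' then 1 else if c = 'C' then 2
  else if c = 'D' then 3 else 0

-- raw_room[3:10:2]; step 2 ≠ 0, so slice? is always some and getD is exact
def pvRow (s : String) : List Char :=
  (PySem.List.slice? s.toList (some 3) (some 10) 2).getD []

def get_initial_state (raw_rooms : List String) (depth : Int) : List (Int × Int × Int × Int) :=
  let rows := raw_rooms.map pvRow
  let locations := (PySem.List.pyRange 0 depth 1).foldl (fun acc i =>
    let row := (PySem.List.pyGet? rows i).getD []   -- rows[i]; in range under Pre_
    (PySem.List.pyRange 0 (row.length : Int) 1).foldl (fun acc j =>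
      acc ++ [((j + 1) * 2, i + 1, -1, pvTypeOf (PySem.List.pyGetD row j ' '))]) acc) []
  PySem.List.sorted locations (fun x => x.2.2.2) false

-- ===== PORT B =====

def pvBucketAdd (bs : List (Int × Int × Int × Int) × List (Int × Int × Int × Int) × List (Int × Int × Int × Int) × List (Int × Int × Int × Int))
    (t : Int) (loc : Int × Int × Int × Int) :
    List (Int × Int × Int × Int) × List (Int × Int × Int × Int) × List (Int × Int × Int × Int) × List (Int × Int × Int × Int) :=
  if t = 0 then (bs.1 ++ [loc], bs.2.1, bs.2.2.1, bs.2.2.2)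
  else if t = 1 then (bs.1, bs.2.1 ++ [loc], bs.2.2.1, bs.2.2.2)
  else if t = 2 then (bs.1, bs.2.1, bs.2.2.1 ++ [loc], bs.2.2.2)
  else (bs.1, bs.2.1, bs.2.2.1, bs.2.2.2 ++ [loc])

def get_initial_state_alt (raw_rooms : List String) (depth : Int) : List (Int × Int × Int × Int) :=
  let bs := (PySem.List.pyRange 0 depth 1).foldl (fun bs i =>
    let row := pvRow ((PySem.List.pyGet? raw_rooms i).getD "")   -- raw_rooms[i]; in range under Pre_
    (PySem.List.enumerate row 0).foldl (fun bs jc =>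
      let t := pvTypeOf jc.2
      pvBucketAdd bs t ((jc.1 + 1) * 2, i + 1, -1, t)) bs) ([], [], [], [])
  bs.1 ++ bs.2.1 ++ bs.2.2.1 ++ bs.2.2.2

-- ===== PRECONDITION & SPEC =====

-- Pre_ excludes exactly the inputs on which Python A raises: depth > len(raw_rooms)
-- (IndexError on rows[i]) and rooms within the first depth rows whose sliced cells
-- contain a character outside "ABCD" (KeyError on TYPES[...]).
def Pre_get_initial_state (raw_rooms : List String) (depth : Int) : Prop :=
  depth ≤ (raw_rooms.length : Int) ∧
  ((raw_rooms.take depth.toNat).all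
    (fun s => (pvRow s).all (fun c => c = 'A' || c = 'B' || c = 'C' || c = 'D'))) = true

instance (raw_rooms : List String) (depth : Int) : Decidable (Pre_get_initial_state raw_rooms depth) := by
  unfold Pre_get_initial_state; infer_instance

def pvWitness_get_initial_state : List String × Int := (["###B#C#D#A#", "###A#A#B#D#"], 2)

def Spec_get_initial_state (raw_rooms : List String) (depth : Int) (out : List (Int × Int × Int × Int)) : Prop := out = get_initial_state_alt raw_rooms depth
instance (raw_rooms : List String) (depth : Int) (out : List (Int × Int × Int × Int)) : Decidable (Spec_get_initial_state raw_rooms depth out) := by unfold Spec_get_initial_state; infer_instance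

-- ===== CLAIM (what is proved, stated in full; the proofs are below) =====
def Claim_equal_get_initial_state : Prop := ∀ (raw_rooms : List String) (depth : Int), Dom_get_initial_state raw_rooms depth → Pre_get_initial_state raw_rooms depth → Spec_get_initial_state raw_rooms depth (get_initial_state raw_rooms depth)

-- ===== LEMMAS AND PROOFS =====

-- the list of locations contributed by row i, in j order
def pvLocRow (raw_rooms : List String) (i : Int) : List (Int × Int × Int × Int) :=
  (PySem.List.enumerate (pvRow ((PySem.List.pyGet? raw_rooms i).getD "")) 0).map
    (fun jc => ((jc.1 + 1) * 2, i + 1, -1, pvTypeOf jc.2))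

-- all locations, in A's generation order
def pvFlat (raw_rooms : List String) (depth : Int) : List (Int × Int × Int × Int) :=
  (PySem.List.pyRange 0 depth 1).flatMap (pvLocRow raw_rooms)

def pvFk (k : Int) (M : List (Int × Int × Int × Int)) : List (Int × Int × Int × Int) :=
  M.filter (fun l => decide (l.2.2.2 = k))

lemma pvTypeOf_cases (c : Char) :
    pvTypeOf c = 0 ∨ pvTypeOf c = 1 ∨ pvTypeOf c = 2 ∨ pvTypeOf c = 3 := by
  unfold pvTypeOf; split_ifs <;> simp

lemma pvFlat_keys (raw_rooms : List String) (depth : Int) :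
    ∀ l ∈ pvFlat raw_rooms depth,
      l.2.2.2 = 0 ∨ l.2.2.2 = 1 ∨ l.2.2.2 = 2 ∨ l.2.2.2 = 3 := by
  intro l hl
  simp only [pvFlat, pvLocRow, List.mem_flatMap, List.mem_map] at hl
  obtain ⟨i, -, jc, -, rfl⟩ := hl
  exact pvTypeOf_cases jc.2

lemma pvPyGet?_map {α β : Type} (f : α → β) (l : List α) (i : Int) :
    PySem.List.pyGet? (l.map f) i = (PySem.List.pyGet? l i).map f := by
  simp [PySem.List.pyGet?, PySem.List.pyIdx?]

lemma pvRowAt_eq (raw_rooms : List String) (i : Int) :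
    (PySem.List.pyGet? (raw_rooms.map pvRow) i).getD []
      = pvRow ((PySem.List.pyGet? raw_rooms i).getD "") := by
  rw [pvPyGet?_map]
  cases PySem.List.pyGet? raw_rooms i with
  | none => simp [pvRow]; decide
  | some s => simp [pvRow]

-- A's inner loop over range(len(row)) produces exactly pvLocRow
lemma pvInnerA (raw_rooms : List String) (i : Int) (acc : List (Int × Int × Int × Int)) :
    (PySem.List.pyRange 0 (((PySem.List.pyGet? (raw_rooms.map pvRow) i).getD []).length : Int) 1).foldl
      (fun acc j =>
        acc ++ [((j + 1) * 2, i + 1, -1,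
          pvTypeOf (PySem.List.pyGetD ((PySem.List.pyGet? (raw_rooms.map pvRow) i).getD []) j ' '))]) acc
      = acc ++ pvLocRow raw_rooms i := by
  rw [PySem.List.foldl_append_singleton_eq_map]
  rw [pvRowAt_eq]
  congr 1
  rw [pvLocRow, PySem.List.enumerate_eq_map_pyRange (d := ' '), List.map_map]
  rfl

lemma pvA_eq_sorted_flat (raw_rooms : List String) (depth : Int) :
    get_initial_state raw_rooms depth
      = PySem.List.sorted (pvFlat raw_rooms depth) (fun x => x.2.2.2) false := by
  unfold get_initial_state
  dsimp only
  congr 1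
  calc _ = (PySem.List.pyRange 0 depth 1).foldl (fun acc i => acc ++ pvLocRow raw_rooms i) [] :=
        PySem.List.foldl_congr_mem _ _ _ _ (fun acc i _ => pvInnerA raw_rooms i acc)
    _ = pvFlat raw_rooms depth := by
        simpa using PySem.List.foldl_append_eq_flatMap (pvLocRow raw_rooms) (PySem.List.pyRange 0 depth 1) []

-- stable insertion: x goes after the elements it is not 'before', before the rest
lemma pvInsertBy_split {α : Type} (before : α → α → Bool) (x : α) (p s : List α)
    (hp : ∀ y ∈ p, before x y = false) (hs : ∀ y ∈ s, before x y = true) :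
    PySem.List.insertBy before x (p ++ s) = p ++ x :: s := by
  induction p with
  | nil =>
    cases s with
    | nil => simp [PySem.List.insertBy]
    | cons hd t => simp [PySem.List.insertBy, hs hd (by simp)]
  | cons hd t ih =>
    have h1 : before x hd = false := hp hd (by simp)
    simp only [List.cons_append, PySem.List.insertBy, h1]
    simp [ih (fun y hy => hp y (by simp [hy]))]

-- the stable insertion sort of a list with keys in {0,1,2,3} concatenates its buckets
lemma pvFoldl_ins (M : List (Int × Int × Int × Int)) :
    ∀ c0 c1 c2 c3 : List (Int × Int × Int × Int),
    (∀ y ∈ c0, y.2.2.2 = 0) → (∀ y ∈ c1, y.2.2.2 = 1) →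
    (∀ y ∈ c2, y.2.2.2 = 2) → (∀ y ∈ c3, y.2.2.2 = 3) →
    (∀ l ∈ M, l.2.2.2 = 0 ∨ l.2.2.2 = 1 ∨ l.2.2.2 = 2 ∨ l.2.2.2 = 3) →
    M.foldl (fun acc x => PySem.List.insertBy
        (fun a b => decide ((a.2.2.2 : Int) < b.2.2.2)) x acc) (c0 ++ c1 ++ c2 ++ c3)
      = (c0 ++ pvFk 0 M) ++ (c1 ++ pvFk 1 M) ++ (c2 ++ pvFk 2 M) ++ (c3 ++ pvFk 3 M) := by
  induction M with
  | nil => intro c0 c1 c2 c3 _ _ _ _ _; simp [pvFk]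
  | cons x M ih =>
    intro c0 c1 c2 c3 h0 h1 h2 h3 hM
    have hM' : ∀ l ∈ M, l.2.2.2 = 0 ∨ l.2.2.2 = 1 ∨ l.2.2.2 = 2 ∨ l.2.2.2 = 3 :=
      fun l hl => hM l (by simp [hl])
    rcases hM x (by simp) with hx | hx | hx | hx
    · rw [List.foldl_cons,
        show c0 ++ c1 ++ c2 ++ c3 = c0 ++ (c1 ++ (c2 ++ c3)) by simp,
        pvInsertBy_split _ x c0 (c1 ++ (c2 ++ c3))
          (fun y hy => by simp [h0 y hy, hx])
          (fun y hy => by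
            rcases (by simpa using hy : y ∈ c1 ∨ y ∈ c2 ∨ y ∈ c3) with h | h | h
            · simp [h1 y h, hx]
            · simp [h2 y h, hx]
            · simp [h3 y h, hx]),
        show c0 ++ x :: (c1 ++ (c2 ++ c3)) = (c0 ++ [x]) ++ c1 ++ c2 ++ c3 by simp]
      rw [ih (c0 ++ [x]) c1 c2 c3
        (fun y hy => by
          rcases (by simpa using hy : y ∈ c0 ∨ y = x) with h | h
          · exact h0 y h
          · simp [h, hx])
        h1 h2 h3 hM']
      simp [pvFk, hx]
    · rw [List.foldl_cons,
        show c0 ++ c1 ++ c2 ++ c3 = (c0 ++ c1) ++ (c2 ++ c3) by simp,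
        pvInsertBy_split _ x (c0 ++ c1) (c2 ++ c3)
          (fun y hy => by
            rcases (by simpa using hy : y ∈ c0 ∨ y ∈ c1) with h | h
            · simp [h0 y h, hx]
            · simp [h1 y h, hx])
          (fun y hy => by
            rcases (by simpa using hy : y ∈ c2 ∨ y ∈ c3) with h | h
            · simp [h2 y h, hx]
            · simp [h3 y h, hx]),
        show (c0 ++ c1) ++ x :: (c2 ++ c3) = c0 ++ (c1 ++ [x]) ++ c2 ++ c3 by simp]
      rw [ih c0 (c1 ++ [x]) c2 c3 h0
        (fun y hy => by
          rcases (by simpa using hy : y ∈ c1 ∨ y = x) with h | h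
          · exact h1 y h
          · simp [h, hx])
        h2 h3 hM']
      simp [pvFk, hx]
    · rw [List.foldl_cons,
        show c0 ++ c1 ++ c2 ++ c3 = (c0 ++ c1 ++ c2) ++ c3 by simp,
        pvInsertBy_split _ x (c0 ++ c1 ++ c2) c3
          (fun y hy => by
            rcases (by simpa using hy : y ∈ c0 ∨ y ∈ c1 ∨ y ∈ c2) with h | h | h
            · simp [h0 y h, hx]
            · simp [h1 y h, hx]
            · simp [h2 y h, hx])
          (fun y hy => by simp [h3 y hy, hx]),
        show (c0 ++ c1 ++ c2) ++ x :: c3 = c0 ++ c1 ++ (c2 ++ [x]) ++ c3 by simp]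
      rw [ih c0 c1 (c2 ++ [x]) c3 h0 h1
        (fun y hy => by
          rcases (by simpa using hy : y ∈ c2 ∨ y = x) with h | h
          · exact h2 y h
          · simp [h, hx])
        h3 hM']
      simp [pvFk, hx]
    · rw [List.foldl_cons,
        show c0 ++ c1 ++ c2 ++ c3 = (c0 ++ c1 ++ c2 ++ c3) ++ [] by simp,
        pvInsertBy_split _ x (c0 ++ c1 ++ c2 ++ c3) []
          (fun y hy => by
            rcases (by simpa using hy : y ∈ c0 ∨ y ∈ c1 ∨ y ∈ c2 ∨ y ∈ c3) with h | h | h | h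
            · simp [h0 y h, hx]
            · simp [h1 y h, hx]
            · simp [h2 y h, hx]
            · simp [h3 y h, hx])
          (fun y hy => by simp at hy),
        show (c0 ++ c1 ++ c2 ++ c3) ++ x :: [] = c0 ++ c1 ++ c2 ++ (c3 ++ [x]) by simp]
      rw [ih c0 c1 c2 (c3 ++ [x]) h0 h1 h2
        (fun y hy => by
          rcases (by simpa using hy : y ∈ c3 ∨ y = x) with h | h
          · exact h3 y h
          · simp [h, hx])
        hM']
      simp [pvFk, hx]

lemma pvSorted_eq_buckets (M : List (Int × Int × Int × Int))
    (hM : ∀ l ∈ M, l.2.2.2 = 0 ∨ l.2.2.2 = 1 ∨ l.2.2.2 = 2 ∨ l.2.2.2 = 3) :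
    PySem.List.sorted M (fun x => x.2.2.2) false
      = pvFk 0 M ++ pvFk 1 M ++ pvFk 2 M ++ pvFk 3 M := by
  rw [PySem.List.sorted_eq_foldl_insertBy]
  simpa using pvFoldl_ins M [] [] [] [] (by simp) (by simp) (by simp) (by simp) hM

-- B's bucket fold computes the four filters
lemma pvFoldl_bucket (M : List (Int × Int × Int × Int)) :
    ∀ b0 b1 b2 b3 : List (Int × Int × Int × Int),
    M.foldl (fun bs l => pvBucketAdd bs l.2.2.2 l) (b0, b1, b2, b3)
      = (b0 ++ pvFk 0 M, b1 ++ pvFk 1 M, b2 ++ pvFk 2 M,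
         b3 ++ M.filter (fun l => decide (l.2.2.2 ≠ 0 ∧ l.2.2.2 ≠ 1 ∧ l.2.2.2 ≠ 2))) := by
  induction M with
  | nil => intro b0 b1 b2 b3; simp [pvFk]
  | cons x M ih =>
    intro b0 b1 b2 b3
    rw [List.foldl_cons]
    by_cases h0 : x.2.2.2 = 0
    · rw [show pvBucketAdd (b0, b1, b2, b3) x.2.2.2 x = (b0 ++ [x], b1, b2, b3) by
        simp [pvBucketAdd, h0], ih]
      simp [pvFk, h0]
    · by_cases h1 : x.2.2.2 = 1
      · rw [show pvBucketAdd (b0, b1, b2, b3) x.2.2.2 x = (b0, b1 ++ [x], b2, b3) by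
          simp [pvBucketAdd, h1], ih]
        simp [pvFk, h1]
      · by_cases h2 : x.2.2.2 = 2
        · rw [show pvBucketAdd (b0, b1, b2, b3) x.2.2.2 x = (b0, b1, b2 ++ [x], b3) by
            simp [pvBucketAdd, h2], ih]
          simp [pvFk, h2]
        · rw [show pvBucketAdd (b0, b1, b2, b3) x.2.2.2 x = (b0, b1, b2, b3 ++ [x]) by
            simp [pvBucketAdd, h0, h1, h2], ih]
          simp [pvFk, h0, h1, h2]

lemma pvFoldl_flatMap {α β γ : Type} (f : α → List β) (g : γ → β → γ) (I : List α) :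
    ∀ st : γ, I.foldl (fun st i => (f i).foldl g st) st = (I.flatMap f).foldl g st := by
  induction I with
  | nil => intro st; simp
  | cons i I ih => intro st; simp [List.flatMap_cons, List.foldl_append, ih]

lemma pvB_eq_buckets_flat (raw_rooms : List String) (depth : Int) :
    get_initial_state_alt raw_rooms depth
      = pvFk 0 (pvFlat raw_rooms depth) ++ pvFk 1 (pvFlat raw_rooms depth)
        ++ pvFk 2 (pvFlat raw_rooms depth) ++ pvFk 3 (pvFlat raw_rooms depth) := by
  unfold get_initial_state_alt
  dsimp only
  have hinner : ∀ (bs : List (Int × Int × Int × Int) × List (Int × Int × Int × Int) ×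
      List (Int × Int × Int × Int) × List (Int × Int × Int × Int)) (i : Int),
      (PySem.List.enumerate (pvRow ((PySem.List.pyGet? raw_rooms i).getD "")) 0).foldl
        (fun bs jc => pvBucketAdd bs (pvTypeOf jc.2) ((jc.1 + 1) * 2, i + 1, -1, pvTypeOf jc.2)) bs
        = (pvLocRow raw_rooms i).foldl (fun bs l => pvBucketAdd bs l.2.2.2 l) bs := by
    intro bs i
    rw [pvLocRow, List.foldl_map]
  rw [PySem.List.foldl_congr_mem _ _ (fun bs i => (pvLocRow raw_rooms i).foldl
        (fun bs l => pvBucketAdd bs l.2.2.2 l) bs) _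
      (fun bs i _ => hinner bs i),
    pvFoldl_flatMap (pvLocRow raw_rooms) (fun bs l => pvBucketAdd bs l.2.2.2 l)
      (PySem.List.pyRange 0 depth 1)]
  rw [show (PySem.List.pyRange 0 depth 1).flatMap (pvLocRow raw_rooms) = pvFlat raw_rooms depth from rfl]
  rw [pvFoldl_bucket]
  have h3 : (pvFlat raw_rooms depth).filter
      (fun l => !decide (l.2.2.2 = 0) && (!decide (l.2.2.2 = 1) && !decide (l.2.2.2 = 2)))
      = pvFk 3 (pvFlat raw_rooms depth) := by
    apply List.filter_congr
    intro l hl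
    rcases pvFlat_keys raw_rooms depth l hl with h | h | h | h <;> simp [h]
  simp [h3]

theorem pv_main (raw_rooms : List String) (depth : Int) :
    get_initial_state raw_rooms depth = get_initial_state_alt raw_rooms depth := by
  rw [pvA_eq_sorted_flat, pvB_eq_buckets_flat,
    pvSorted_eq_buckets _ (pvFlat_keys raw_rooms depth)]

-- ===== VERDICT (by name: the statement is the Claim_ definition above) =====
theorem get_initial_state_spec : Claim_equal_get_initial_state := by
  intro raw_rooms depth _ _
  unfold Spec_get_initial_state
  exact pv_main raw_rooms depth
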